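-- pv_equiv track=rewrite | github.com/childe/leetcode | number-of-valid-words-in-a-sentence/solution.py | if_valid_word
-- ===== SOURCE A (Python) =====
-- def if_valid_word(word: str) -> bool:
--     """
--     >>> s = Solution()
--     >>> s.if_valid_word('!this')
--     False
--     >>> s.if_valid_word('1-s!')
--     False
--     >>> s.if_valid_word('b8d!')
--     False
--     >>> s.if_valid_word('stone-game10')
--     False
--     >>> s.if_valid_word('dog')
--     True
--     """
--     l = len(word)
--     hyphen_count = 0
--     for i, c in enumerate(word):
--         if "0" <= c <= "9":
--             return False
--         if c in (".", ",", "!"):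
--             if i == l - 1:
--                 return True
--             return False
--         if c == "-":
--             if hyphen_count == 1:
--                 return False
--             if i == 0 or i == l - 1:
--                 return False
--             if word[i - 1] < "a" or word[i - 1] > "z":
--                 return False
--             if word[i + 1] < "a" or word[i + 1] > "z":
--                 return False
--             hyphen_count += 1
--
--     return True
-- ===== SOURCE B (Python) =====
-- def if_valid_word(word: str) -> bool:
--     # Stage 1: strip one optional trailing punctuation mark.
--     body = word[:-1] if word.endswith(('.', ',', '!')) else word
--     # Stage 2: the remaining text may contain no digit or punctuation mark.
--     if any(c in '0123456789.,!' for c in body):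
--         return False
--     # Stage 3: locate the first hyphen; it must be unique, interior, and
--     # flanked by ASCII-lowercase letters.
--     i = body.find('-')
--     if i == -1:
--         return True
--     return (0 < i < len(body) - 1
--             and '-' not in body[i + 1:]
--             and 'a' <= body[i - 1] <= 'z'
--             and 'a' <= body[i + 1] <= 'z')
-- ===== Notes on version B (the rewrite author's own statement) =====
-- stated objective: alternative
-- what changed: A's single stateful scan with early returns and a mutable hyphen counter is replaced by a staged pipeline: strip one optional trailing punctuation mark, reject any digit/punctuation in the remainder with one global membership scan, then locate the first hyphen with str.find and validate it (unique, interior, lowercase-flanked) directly.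
import Mathlib
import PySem

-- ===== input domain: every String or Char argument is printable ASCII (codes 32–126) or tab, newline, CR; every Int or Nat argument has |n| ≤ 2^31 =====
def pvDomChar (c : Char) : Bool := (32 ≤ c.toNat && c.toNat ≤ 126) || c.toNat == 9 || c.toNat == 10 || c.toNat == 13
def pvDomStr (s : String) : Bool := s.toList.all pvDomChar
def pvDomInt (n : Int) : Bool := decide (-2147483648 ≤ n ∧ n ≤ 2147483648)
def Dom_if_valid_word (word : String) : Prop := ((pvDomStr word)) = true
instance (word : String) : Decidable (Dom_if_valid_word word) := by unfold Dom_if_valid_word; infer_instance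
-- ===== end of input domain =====

-- B replaces A's stateful early-return scanner (mutable hyphen counter) by a staged pipeline:
-- strip one optional trailing punctuation mark, reject bad characters globally, then validate
-- the first hyphen found (idiomatic/alternative decomposition, same cost).


-- ===== PORT A =====
-- A's for-loop over enumerate(word) with early returns and the mutable hyphen_count,
-- as structural recursion on the remaining characters with index i and counter hc.
def loopA (cs : List Char) (l : Nat) : List Char → Nat → Nat → Bool
  | [], _, _ => true
  | c :: rest, i, hc =>
    if '0' ≤ c ∧ c ≤ '9' then false
    else if c = '.' ∨ c = ',' ∨ c = '!' then decide (i = l - 1)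
    else if c = '-' then
      if hc = 1 then false
      else if i = 0 ∨ i = l - 1 then false
      -- word[i-1] / word[i+1]: in range here (0 < i < l-1), so getD is exact
      else if cs.getD (i-1) ' ' < 'a' ∨ 'z' < cs.getD (i-1) ' ' then false
      else if cs.getD (i+1) ' ' < 'a' ∨ 'z' < cs.getD (i+1) ' ' then false
      else loopA cs l rest (i+1) (hc+1)
    else loopA cs l rest (i+1) hc

def if_valid_word (word : String) : Bool :=
  loopA word.toList word.toList.length word.toList 0 0

-- ===== PORT B =====
-- stages 2 and 3 of Source B, acting on the already-stripped body
def altBody (body : List Char) : Bool :=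
  -- Stage 2: any(c in '0123456789.,!' for c in body) — digits by comparison, marks by membership
  if body.any (fun c => decide ('0' ≤ c ∧ c ≤ '9') || PySem.Chars.isIn [c] ['.', ',', '!']) then
    false
  else
    -- Stage 3: i = body.find('-')
    let i := PySem.Chars.find body ['-']
    if i = -1 then true
    else
      decide (0 < i) && decide (i < (body.length : Int) - 1) &&
      !(PySem.Chars.isIn ['-'] (body.drop (i.toNat + 1))) &&
      decide ('a' ≤ body.getD (i.toNat - 1) ' ' ∧ body.getD (i.toNat - 1) ' ' ≤ 'z') &&
      decide ('a' ≤ body.getD (i.toNat + 1) ' ' ∧ body.getD (i.toNat + 1) ' ' ≤ 'z')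

-- Stage 1: body = word[:-1] if word.endswith(('.', ',', '!')) else word
def if_valid_word_alt (word : String) : Bool :=
  let cs := word.toList
  let body :=
    if PySem.Chars.endswith cs ['.'] || PySem.Chars.endswith cs [','] || PySem.Chars.endswith cs ['!']
    then cs.dropLast else cs
  altBody body

-- ===== PRECONDITION & SPEC =====
def Spec_if_valid_word (word : String) (out : Bool) : Prop := out = if_valid_word_alt word
instance (word : String) (out : Bool) : Decidable (Spec_if_valid_word word out) := by unfold Spec_if_valid_word; infer_instance

-- ===== CLAIM (what is proved, stated in full; the proofs are below) =====
def Claim_equal_if_valid_word : Prop := ∀ (word : String), Dom_if_valid_word word → Spec_if_valid_word word (if_valid_word word)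

-- ===== LEMMAS AND PROOFS =====

-- pointwise validity of position i of cs (proof-only middle form; l is cs.length at use sites)
def okB (cs : List Char) (l : Nat) (i : Nat) (c : Char) : Bool :=
  if '0' ≤ c ∧ c ≤ '9' then false
  else if c = '.' ∨ c = ',' ∨ c = '!' then decide (i = l - 1)
  else if c = '-' then
    decide (0 < i) && decide (i < l - 1) &&
    decide ('a' ≤ cs.getD (i-1) ' ' ∧ cs.getD (i-1) ' ' ≤ 'z') &&
    decide ('a' ≤ cs.getD (i+1) ' ' ∧ cs.getD (i+1) ' ' ≤ 'z')
  else true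

def allOkB (cs : List Char) : Bool :=
  (PySem.List.enumerate cs).all (fun p => okB cs cs.length p.1.toNat p.2)

lemma okB_eq_false_of_digit {cs : List Char} {l i : Nat} {c : Char}
    (h : '0' ≤ c ∧ c ≤ '9') : okB cs l i c = false := by
  unfold okB; rw [if_pos h]

lemma okB_eq_of_punct {cs : List Char} {l i : Nat} {c : Char}
    (hd : ¬('0' ≤ c ∧ c ≤ '9')) (hp : c = '.' ∨ c = ',' ∨ c = '!') :
    okB cs l i c = decide (i = l - 1) := by
  unfold okB; rw [if_neg hd, if_pos hp]

lemma okB_eq_of_hyphen {cs : List Char} {l i : Nat} {c : Char}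
    (hd : ¬('0' ≤ c ∧ c ≤ '9')) (hp : ¬(c = '.' ∨ c = ',' ∨ c = '!')) (hh : c = '-') :
    okB cs l i c =
      (decide (0 < i) && decide (i < l - 1) &&
       decide ('a' ≤ cs.getD (i-1) ' ' ∧ cs.getD (i-1) ' ' ≤ 'z') &&
       decide ('a' ≤ cs.getD (i+1) ' ' ∧ cs.getD (i+1) ' ' ≤ 'z')) := by
  unfold okB; rw [if_neg hd, if_neg hp, if_pos hh]

lemma okB_eq_true_of_other {cs : List Char} {l i : Nat} {c : Char}
    (hd : ¬('0' ≤ c ∧ c ≤ '9')) (hp : ¬(c = '.' ∨ c = ',' ∨ c = '!')) (hh : ¬ c = '-') :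
    okB cs l i c = true := by
  unfold okB; rw [if_neg hd, if_neg hp, if_neg hh]

lemma allOkB_eq_true_iff (cs : List Char) :
    allOkB cs = true ↔ ∀ (j : Nat) (hj : j < cs.length), okB cs cs.length j cs[j] = true := by
  unfold allOkB
  rw [List.all_eq_true]
  constructor
  · intro h j hj
    have h2 := h ((0 : Int) + j, cs[j])
      (by rw [PySem.List.mem_enumerate_iff]; exact ⟨j, hj, rfl⟩)
    simpa using h2
  · intro h p hp
    rw [PySem.List.mem_enumerate_iff] at hp
    obtain ⟨k, hk, rfl⟩ := hp
    simpa using h k hk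

lemma rhs_false_of_bad (cs : List Char) (i : Nat) (hi : i < cs.length)
    (hbad : okB cs cs.length i cs[i] = false) :
    (decide (cs.count '-' ≤ 1) && allOkB cs) = false := by
  have h : allOkB cs = false := by
    cases h : allOkB cs with
    | false => rfl
    | true =>
      exact absurd ((allOkB_eq_true_iff cs).1 h i hi)
        (by rw [hbad]; exact Bool.false_ne_true)
  rw [h, Bool.and_false]

-- ---- A's loop equals the middle form (hyphen count ≤ 1 ∧ every position ok) ----
lemma loopA_eq (cs : List Char) : ∀ (rest : List Char) (i hc : Nat),
    cs.drop i = rest →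
    (cs.take i).count '-' = hc →
    (∀ (j : Nat) (hj : j < cs.length), j < i → okB cs cs.length j cs[j] = true) →
    hc ≤ 1 →
    loopA cs cs.length rest i hc
      = (decide (cs.count '-' ≤ 1) && allOkB cs) := by
  intro rest
  induction rest generalizing cs with
  | nil =>
    intro i hc hdrop htake hpre hhc
    have hlen : cs.length ≤ i := List.drop_eq_nil_iff.mp hdrop
    have htk : cs.take i = cs := List.take_of_length_le hlen
    rw [htk] at htake
    have hcnt : cs.count '-' ≤ 1 := by omega
    have hall : allOkB cs = true :=
      (allOkB_eq_true_iff cs).2 (fun j hj => hpre j hj (lt_of_lt_of_le hj hlen))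
    simp only [loopA]
    rw [hall, decide_eq_true hcnt, Bool.and_true]
  | cons c rest' ih =>
    intro i hc hdrop htake hpre hhc
    have hi : i < cs.length := by
      by_contra hcon
      rw [List.drop_eq_nil_of_le (Nat.le_of_not_lt hcon)] at hdrop
      exact absurd hdrop (by simp)
    have hdc : cs.drop i = cs[i] :: cs.drop (i+1) := List.drop_eq_getElem_cons hi
    have hinj := hdrop.symm.trans hdc
    injection hinj with hinj1 hinj2
    have hgetc : cs[i] = c := hinj1.symm
    have hrest' : cs.drop (i+1) = rest' := hinj2.symm
    have htk1 : cs.take (i+1) = cs.take i ++ [c] := by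
      rw [List.take_add_one, List.getElem?_eq_getElem hi, hgetc]; rfl
    simp only [loopA]
    by_cases hdig : '0' ≤ c ∧ c ≤ '9'
    · rw [if_pos hdig,
        rhs_false_of_bad cs i hi (by rw [hgetc]; exact okB_eq_false_of_digit hdig)]
    · rw [if_neg hdig]
      by_cases hpunct : c = '.' ∨ c = ',' ∨ c = '!'
      · rw [if_pos hpunct]
        by_cases hlast : i = cs.length - 1
        · -- terminal punctuation: both sides are true
          have hdropall : cs.drop (i+1) = [] := List.drop_eq_nil_of_le (by omega)
          have hcs : cs = cs.take i ++ [c] := by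
            have h1 := List.take_append_drop (i+1) cs
            rw [hdropall, htk1] at h1
            simpa using h1.symm
          have hccount : List.count '-' [c] = 0 := by
            rcases hpunct with h | h | h <;> subst h <;> decide
          have hcnt : cs.count '-' ≤ 1 := by
            have h2 := congrArg (List.count '-') hcs
            rw [List.count_append] at h2
            omega
          have hall : allOkB cs = true := by
            rw [allOkB_eq_true_iff]
            intro j hj
            rcases Nat.lt_or_ge j i with hji | hji
            · exact hpre j hj hji
            · have hje : j = i := by omega
              subst hje
              rw [hgetc, okB_eq_of_punct hdig hpunct, decide_eq_true hlast]
          rw [decide_eq_true hlast, decide_eq_true hcnt, hall, Bool.and_true]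
        · rw [rhs_false_of_bad cs i hi
              (by rw [hgetc, okB_eq_of_punct hdig hpunct]; exact decide_eq_false hlast)]
          exact decide_eq_false hlast
      · rw [if_neg hpunct]
        by_cases hhy : c = '-'
        · rw [if_pos hhy]
          by_cases hc1 : hc = 1
          · -- a second hyphen: the global count exceeds 1
            rw [if_pos hc1]
            have h2 := congrArg (List.count '-') (List.take_append_drop i cs)
            rw [List.count_append, hdrop] at h2
            have h3 : List.count '-' (c :: rest') = List.count '-' rest' + 1 := by
              rw [hhy]; exact List.count_cons_self
            have hcnt : ¬ (cs.count '-' ≤ 1) := by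
              show ¬ (List.count '-' cs ≤ 1); omega
            rw [decide_eq_false hcnt, Bool.false_and]
          · rw [if_neg hc1]
            by_cases hend : i = 0 ∨ i = cs.length - 1
            · rw [if_pos hend]
              have hbad : okB cs cs.length i cs[i] = false := by
                rw [hgetc, okB_eq_of_hyphen hdig hpunct hhy]
                rcases hend with h | h
                · subst h; simp
                · have h2 : ¬ (i < cs.length - 1) := by omega
                  rw [decide_eq_false h2]; simp
              rw [rhs_false_of_bad cs i hi hbad]
            · rw [if_neg hend]
              obtain ⟨he0, he1⟩ := not_or.mp hend
              by_cases hlft : cs.getD (i-1) ' ' < 'a' ∨ 'z' < cs.getD (i-1) ' '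
              · rw [if_pos hlft]
                have hl' : ¬('a' ≤ cs.getD (i-1) ' ' ∧ cs.getD (i-1) ' ' ≤ 'z') := by
                  rcases hlft with h | h
                  · exact fun hh => absurd hh.1 (not_le.2 h)
                  · exact fun hh => absurd hh.2 (not_le.2 h)
                have hbad : okB cs cs.length i cs[i] = false := by
                  rw [hgetc, okB_eq_of_hyphen hdig hpunct hhy, decide_eq_false hl']
                  simp
                rw [rhs_false_of_bad cs i hi hbad]
              · rw [if_neg hlft]
                by_cases hrgt : cs.getD (i+1) ' ' < 'a' ∨ 'z' < cs.getD (i+1) ' '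
                · rw [if_pos hrgt]
                  have hr' : ¬('a' ≤ cs.getD (i+1) ' ' ∧ cs.getD (i+1) ' ' ≤ 'z') := by
                    rcases hrgt with h | h
                    · exact fun hh => absurd hh.1 (not_le.2 h)
                    · exact fun hh => absurd hh.2 (not_le.2 h)
                  have hbad : okB cs cs.length i cs[i] = false := by
                    rw [hgetc, okB_eq_of_hyphen hdig hpunct hhy, decide_eq_false hr']
                    simp
                  rw [rhs_false_of_bad cs i hi hbad]
                · rw [if_neg hrgt]
                  -- a valid hyphen: recurse with hc+1
                  obtain ⟨hl1, hl2⟩ := not_or.mp hlft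
                  obtain ⟨hr1, hr2⟩ := not_or.mp hrgt
                  have hok : okB cs cs.length i cs[i] = true := by
                    rw [hgetc, okB_eq_of_hyphen hdig hpunct hhy,
                      decide_eq_true (Nat.pos_of_ne_zero he0),
                      decide_eq_true (show i < cs.length - 1 by omega),
                      decide_eq_true ⟨not_lt.mp hl1, not_lt.mp hl2⟩,
                      decide_eq_true ⟨not_lt.mp hr1, not_lt.mp hr2⟩]
                    rfl
                  have hcnt1 : (cs.take (i+1)).count '-' = hc + 1 := by
                    rw [htk1, List.count_append, htake, hhy]
                    simp
                  exact ih cs (i+1) (hc+1) hrest' hcnt1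
                    (fun j hj hji => by
                      rcases Nat.lt_or_ge j i with h | h
                      · exact hpre j hj h
                      · have hje : j = i := by omega
                        subst hje; exact hok)
                    (by omega)
        · -- an ordinary character: recurse with hc unchanged
          rw [if_neg hhy]
          have hok : okB cs cs.length i cs[i] = true := by
            rw [hgetc]; exact okB_eq_true_of_other hdig hpunct hhy
          have hcnt1 : (cs.take (i+1)).count '-' = hc := by
            rw [htk1, List.count_append, htake]
            have hc0 : List.count '-' [c] = 0 := by
              simp [hhy]
            omega
          exact ih cs (i+1) hc hrest' hcnt1
            (fun j hj hji => by
              rcases Nat.lt_or_ge j i with h | h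
              · exact hpre j hj h
              · have hje : j = i := by omega
                subst hje; exact hok)
            hhc

-- ---- B equals the same middle form ----

lemma singleton_infix_iff {c : Char} {l : List Char} : [c] <:+: l ↔ c ∈ l := by
  constructor
  · intro h; exact h.mem (List.mem_singleton_self c)
  · intro h
    obtain ⟨a, b, rfl⟩ := List.mem_iff_append.mp h
    exact ⟨a, b, by simp⟩

lemma singleton_suffix_iff {c : Char} {l : List Char} : [c] <:+ l ↔ l.getLast? = some c := by
  constructor
  · intro ⟨t, ht⟩; rw [← ht]; exact List.getLast?_concat
  · intro h
    obtain ⟨ys, rfl⟩ := List.getLast?_eq_some_iff.mp h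
    exact ⟨ys, rfl⟩

lemma singleton_prefix_drop {c : Char} {l : List Char} {n : Nat} :
    [c] <+: l.drop n ↔ ∃ h : n < l.length, l[n] = c := by
  constructor
  · intro ⟨t, ht⟩
    have hlt : n < l.length := by
      by_contra hcon
      rw [List.drop_eq_nil_of_le (Nat.le_of_not_lt hcon)] at ht
      exact absurd ht (by simp)
    have h2 := (List.drop_eq_getElem_cons hlt).symm.trans ht.symm
    injection h2 with h21 _
    exact ⟨hlt, h21⟩
  · intro ⟨h, hc⟩
    exact ⟨l.drop (n+1), by rw [List.drop_eq_getElem_cons h, hc]; rfl⟩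

lemma getD_append_left {l l2 : List Char} {n : Nat} {d : Char} (h : n < l.length) :
    (l ++ l2).getD n d = l.getD n d := by
  simp [List.getD, List.getElem?_append_left h]

-- core: B's stage 2+3 on the stripped body equal the middle form on the full word
lemma mem_drop_iff {c : Char} {l : List Char} {k : Nat} :
    c ∈ l.drop k ↔ ∃ (i : Nat) (h : i < l.length), k ≤ i ∧ l[i] = c := by
  constructor
  · intro hm
    obtain ⟨i, hi, hig⟩ := List.mem_iff_getElem.mp hm
    have hi' : i < l.length - k := by rw [List.length_drop] at hi; omega
    refine ⟨k + i, by omega, by omega, ?_⟩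
    rw [← List.getElem_drop (h := by rw [List.length_drop]; omega)]
    exact hig
  · intro ⟨i, h, hk, hg⟩
    apply List.mem_iff_getElem.mpr
    refine ⟨i - k, by rw [List.length_drop]; omega, ?_⟩
    rw [List.getElem_drop (h := by rw [List.length_drop]; omega)]
    have he : k + (i - k) = i := by omega
    simp only [he]
    exact hg

lemma core (body tail : List Char)
    (ht : tail = [] ∨ ∃ p, (p = '.' ∨ p = ',' ∨ p = '!') ∧ tail = [p])
    (hnp : tail = [] → ∀ c, body.getLast? = some c → ¬(c = '.' ∨ c = ',' ∨ c = '!')) :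
    altBody body = (decide ((body ++ tail).count '-' ≤ 1) && allOkB (body ++ tail)) := by
  have htc : tail.count '-' = 0 := by
    rcases ht with rfl | ⟨p, hp, rfl⟩
    · rfl
    · rcases hp with rfl | rfl | rfl <;> decide
  have hcount : (body ++ tail).count '-' = body.count '-' := by
    rw [List.count_append, htc]
    omega
  have htlen : tail.length ≤ 1 := by
    rcases ht with rfl | ⟨p, hp, rfl⟩ <;> simp
  have hpne : ∀ (j : Nat) (hj : j < body.length),
      (body[j] = '.' ∨ body[j] = ',' ∨ body[j] = '!') → ¬ j = (body ++ tail).length - 1 := by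
    intro j hj hp hje
    rcases ht with rfl | ⟨p, hp2, rfl⟩
    · simp only [List.append_nil] at hje
      subst hje
      have hlast : body.getLast? = some body[body.length - 1] := by
        rw [List.getLast?_eq_getElem?, List.getElem?_eq_getElem (by omega : body.length - 1 < body.length)]
      exact hnp rfl _ hlast hp
    · rw [List.length_append] at hje
      simp at hje
      omega
  have htail_ok : ∀ (j : Nat) (hj : j < (body ++ tail).length), body.length ≤ j →
      okB (body ++ tail) (body ++ tail).length j ((body ++ tail)[j]) = true := by
    intro j hj hge
    rcases ht with rfl | ⟨p, hp2, rfl⟩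
    · rw [List.length_append] at hj; simp at hj; omega
    · have hj' : j = body.length := by rw [List.length_append] at hj; simp at hj; omega
      have hgp : (body ++ [p])[j] = p := by
        rw [List.getElem_append_right (by omega)]
        simp [hj']
      rw [hgp, okB_eq_of_punct (by rcases hp2 with rfl | rfl | rfl <;> decide) hp2]
      apply decide_eq_true
      rw [List.length_append]; simp; omega
  unfold altBody
  cases hbad : body.any (fun c => decide ('0' ≤ c ∧ c ≤ '9') || PySem.Chars.isIn [c] ['.', ',', '!']) with
  | true =>
    rw [if_pos rfl]
    symm
    obtain ⟨c, hcmem, hcb⟩ := List.any_eq_true.mp hbad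
    obtain ⟨j, hj, rfl⟩ := List.mem_iff_getElem.mp hcmem
    have hj2 : j < (body ++ tail).length := by rw [List.length_append]; omega
    apply rhs_false_of_bad (body ++ tail) j hj2
    rw [List.getElem_append_left hj]
    simp only [Bool.or_eq_true, decide_eq_true_eq] at hcb
    rcases hcb with hd | hpn
    · exact okB_eq_false_of_digit hd
    · have hp3 : body[j] = '.' ∨ body[j] = ',' ∨ body[j] = '!' := by
        have := singleton_infix_iff.mp ((PySem.Chars.isIn_iff_infix _ _).mp hpn)
        simpa using this
      have hnd : ¬('0' ≤ body[j] ∧ body[j] ≤ '9') := by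
        rcases hp3 with h | h | h <;> rw [h] <;> decide
      rw [okB_eq_of_punct hnd hp3]
      exact decide_eq_false (hpne j hj hp3)
  | false =>
    rw [if_neg (by simp)]
    have hclean : ∀ (j : Nat) (hj : j < body.length),
        ¬('0' ≤ body[j] ∧ body[j] ≤ '9') ∧ ¬(body[j] = '.' ∨ body[j] = ',' ∨ body[j] = '!') := by
      intro j hj
      have h2 := List.any_eq_false.mp hbad body[j] (List.getElem_mem hj)
      simp only [Bool.or_eq_true, decide_eq_true_eq, not_or] at h2
      obtain ⟨h2a, h2b⟩ := h2
      refine ⟨h2a, fun hp => h2b ?_⟩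
      rw [PySem.Chars.isIn_iff_infix, singleton_infix_iff]
      simpa using hp
    by_cases hf1 : PySem.Chars.find body ['-'] = -1
    · rw [if_pos hf1]
      have hnh : '-' ∉ body := fun hm =>
        (PySem.Chars.find_eq_neg_one_iff body ['-']).mp hf1 (singleton_infix_iff.mpr hm)
      have hc0 : body.count '-' = 0 := List.count_eq_zero.mpr hnh
      symm
      have hall : allOkB (body ++ tail) = true := by
        rw [allOkB_eq_true_iff]
        intro j hj
        by_cases hjb : j < body.length
        · rw [List.getElem_append_left hjb]
          obtain ⟨hd, hp⟩ := hclean j hjb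
          exact okB_eq_true_of_other hd hp (fun he => hnh (he ▸ List.getElem_mem hjb))
        · exact htail_ok j hj (Nat.le_of_not_lt hjb)
      rw [hall, hcount, hc0]
      simp
    · rw [if_neg hf1]
      have hf0 : 0 ≤ PySem.Chars.find body ['-'] := by
        have := PySem.Chars.neg_one_le_find body ['-']
        omega
      obtain ⟨hpre, hmin⟩ := PySem.Chars.find_spec hf0
      set n := (PySem.Chars.find body ['-']).toNat with hndef
      obtain ⟨hnlt, hbn⟩ := singleton_prefix_drop.mp hpre
      have hfn : PySem.Chars.find body ['-'] = (n : Int) := (Int.toNat_of_nonneg hf0).symm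
      have hbefore : ∀ (i : Nat) (hi : i < body.length), i < n → body[i] ≠ '-' := by
        intro i hi hin he
        exact hmin i hin (singleton_prefix_drop.mpr ⟨hi, he⟩)
      have htk1 : body.take (n+1) = body.take n ++ ['-'] := by
        rw [List.take_add_one, List.getElem?_eq_getElem hnlt, hbn]
        rfl
      have hsplit : (body.take (n+1)).count '-' + (body.drop (n+1)).count '-' = body.count '-' := by
        rw [← List.count_append, List.take_append_drop]
      have htkc : (body.take (n+1)).count '-' = (body.take n).count '-' + 1 := by
        rw [htk1, List.count_append]
        simp
      have htkn : (body.take n).count '-' = 0 := by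
        rw [List.count_eq_zero]
        intro hm
        obtain ⟨i, hi, hig⟩ := List.mem_iff_getElem.mp hm
        have hi2 : i < n := by rw [List.length_take] at hi; omega
        have hi3 : i < body.length := by rw [List.length_take] at hi; omega
        exact hbefore i hi3 hi2 (by rw [← List.getElem_take (h := hi)]; exact hig)
      by_cases hlater : '-' ∈ body.drop (n+1)
      · have hiIn : PySem.Chars.isIn ['-'] (body.drop (n+1)) = true := by
          rw [PySem.Chars.isIn_iff_infix, singleton_infix_iff]
          exact hlater
        have hd1 : 0 < (body.drop (n+1)).count '-' := List.count_pos_iff.mpr hlater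
        have hge2 : ¬((body ++ tail).count '-' ≤ 1) := by rw [hcount]; omega
        rw [decide_eq_false hge2, Bool.false_and, hiIn]
        simp
      · have hiIn : PySem.Chars.isIn ['-'] (body.drop (n+1)) = false := by
          rw [← Bool.not_eq_true, PySem.Chars.isIn_iff_infix, singleton_infix_iff]
          exact hlater
        have hdc : (body.drop (n+1)).count '-' = 0 := List.count_eq_zero.mpr hlater
        have hcnt1 : body.count '-' = 1 := by omega
        obtain ⟨hnd, hnpu⟩ := hclean n hnlt
        rw [hfn, hiIn, hcount, hcnt1, decide_eq_true (show (1:Nat) ≤ 1 by omega),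
          Bool.true_and, Bool.not_false, Bool.and_true]
        rw [Bool.eq_iff_iff]
        simp only [Bool.and_eq_true, decide_eq_true_eq]
        constructor
        · intro ⟨⟨⟨h01, h02⟩, h04⟩, h05⟩
          have hn0 : 0 < n := by exact_mod_cast h01
          have hn1 : n + 1 < body.length := by omega
          rw [allOkB_eq_true_iff]
          intro j hj
          by_cases hjb : j < body.length
          · rw [List.getElem_append_left hjb]
            obtain ⟨hd, hp⟩ := hclean j hjb
            by_cases hhy : body[j] = '-'
            · have hjn : j = n := by
                rcases Nat.lt_trichotomy j n with h | h | h
                · exact absurd hhy (hbefore j hjb h)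
                · exact h
                · exact absurd (mem_drop_iff.mpr ⟨j, hjb, by omega, hhy⟩) hlater
              subst hjn
              rw [okB_eq_of_hyphen hd hp hhy,
                decide_eq_true hn0,
                decide_eq_true (show n < (body ++ tail).length - 1 by
                  rw [List.length_append]; omega),
                decide_eq_true (show 'a' ≤ (body ++ tail).getD (n-1) ' ' ∧ (body ++ tail).getD (n-1) ' ' ≤ 'z' by
                  rw [getD_append_left (by omega)]; exact h04),
                decide_eq_true (show 'a' ≤ (body ++ tail).getD (n+1) ' ' ∧ (body ++ tail).getD (n+1) ' ' ≤ 'z' by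
                  rw [getD_append_left (by omega)]; exact h05)]
              rfl
            · exact okB_eq_true_of_other hd hp hhy
          · exact htail_ok j hj (Nat.le_of_not_lt hjb)
        · intro hall
          have hOk := (allOkB_eq_true_iff _).mp hall n (by rw [List.length_append]; omega)
          rw [List.getElem_append_left hnlt, okB_eq_of_hyphen hnd hnpu hbn] at hOk
          simp only [Bool.and_eq_true, decide_eq_true_eq] at hOk
          obtain ⟨⟨⟨h1, h2⟩, h3⟩, h4⟩ := hOk
          have hn1 : n + 1 < body.length := by
            rcases ht with rfl | ⟨p, hp2, rfl⟩
            · rw [List.length_append] at h2; simp at h2; omega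
            · by_contra hcon
              have hne : n + 1 = body.length := by omega
              have hgp : (body ++ [p]).getD (n+1) ' ' = p := by
                simp only [List.getD]
                rw [List.getElem?_append_right (by omega), hne]
                simp
              rw [hgp] at h4
              rcases hp2 with rfl | rfl | rfl <;> revert h4 <;> decide
          rw [getD_append_left (show n - 1 < body.length by omega)] at h3
          rw [getD_append_left hn1] at h4
          refine ⟨⟨⟨by exact_mod_cast h1, ?_⟩, h3⟩, h4⟩
          omega


lemma alt_eq (cs : List Char) :
    altBody (if PySem.Chars.endswith cs ['.'] || PySem.Chars.endswith cs [','] || PySem.Chars.endswith cs ['!']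
     then cs.dropLast else cs)
      = (decide (cs.count '-' ≤ 1) && allOkB cs) := by
  cases hE : (PySem.Chars.endswith cs ['.'] || PySem.Chars.endswith cs [','] || PySem.Chars.endswith cs ['!']) with
  | true =>
    rw [if_pos rfl]
    have hE : (PySem.Chars.endswith cs ['.'] || PySem.Chars.endswith cs [','] || PySem.Chars.endswith cs ['!']) = true := hE
    simp only [Bool.or_eq_true, PySem.Chars.endswith_iff, singleton_suffix_iff] at hE
    have hex : ∃ p, (p = '.' ∨ p = ',' ∨ p = '!') ∧ cs.getLast? = some p := by
      rcases hE with (h | h) | h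
      · exact ⟨'.', by simp, h⟩
      · exact ⟨',', by simp, h⟩
      · exact ⟨'!', by simp, h⟩
    obtain ⟨p, hp, hlast⟩ := hex
    obtain ⟨ys, rfl⟩ := List.getLast?_eq_some_iff.mp hlast
    rw [List.dropLast_concat]
    exact core ys [p] (Or.inr ⟨p, hp, rfl⟩) (by intro h; exact absurd h (by simp))
  | false =>
    rw [if_neg (by simp)]
    have hE : (PySem.Chars.endswith cs ['.'] || PySem.Chars.endswith cs [','] || PySem.Chars.endswith cs ['!']) = false := hE
    have h2 : altBody cs = (decide ((cs ++ []).count '-' ≤ 1) && allOkB (cs ++ [])) := by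
      apply core cs [] (Or.inl rfl)
      intro _ c hlast hcp
      simp only [Bool.or_eq_false_iff] at hE
      obtain ⟨⟨h1, h2⟩, h3⟩ := hE
      rcases hcp with rfl | rfl | rfl
      · rw [← Bool.not_eq_true, PySem.Chars.endswith_iff, singleton_suffix_iff] at h1
        exact h1 hlast
      · rw [← Bool.not_eq_true, PySem.Chars.endswith_iff, singleton_suffix_iff] at h2
        exact h2 hlast
      · rw [← Bool.not_eq_true, PySem.Chars.endswith_iff, singleton_suffix_iff] at h3
        exact h3 hlast
    simpa using h2

-- ===== VERDICT (by name: the statement is the Claim_ definition above) =====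
theorem if_valid_word_spec : Claim_equal_if_valid_word := by
  intro word _
  unfold Spec_if_valid_word if_valid_word if_valid_word_alt
  show loopA word.toList word.toList.length word.toList 0 0
      = altBody (if PySem.Chars.endswith word.toList ['.'] || PySem.Chars.endswith word.toList [','] || PySem.Chars.endswith word.toList ['!']
         then word.toList.dropLast else word.toList)
  rw [alt_eq word.toList]
  exact loopA_eq word.toList word.toList 0 0 rfl rfl
    (fun j hj hji => absurd hji (Nat.not_lt_zero j)) (by omega)
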